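-- pv_equiv track=rewrite | github.com/yaziuma/multi-agent-bakuhu | scripts/seo_qc.py | check_010_cost_table
-- ===== SOURCE A (Python) =====
-- def find_h2_sections(body: str) -> list[tuple[str, str]]:
--     """Find H2 sections and their content. Returns list of (heading, section_content)."""
--     lines = body.split("\n")
--     sections = []
--     current_heading = None
--     current_lines = []
--
--     for line in lines:
--         if line.startswith("## "):
--             if current_heading is not None:
--                 sections.append((current_heading, "\n".join(current_lines)))
--             current_heading = line
--             current_lines = []
--         elif current_heading is not None:
--             current_lines.append(line)
--
--     if current_heading is not None:
--         sections.append((current_heading, "\n".join(current_lines)))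
--
--     return sections
--
-- def check_010_cost_table(body: str) -> tuple[bool, str]:
--     """Check that first H2 section contains a markdown table (>= 4 lines)."""
--     sections = find_h2_sections(body)
--     if not sections:
--         return False, "no H2 sections"
--
--     first_section = sections[0][1]
--     table_lines = [l for l in first_section.split("\n") if l.strip().startswith("|")]
--     if len(table_lines) >= 4:
--         return True, ""
--     return False, f"table lines in H2-1: {len(table_lines)}"
-- ===== SOURCE B (Python) =====
-- def check_010_cost_table(body: str) -> tuple[bool, str]:
--     """Check that first H2 section contains a markdown table (>= 4 lines)."""
--     lines = body.split("\n")
--     for i, line in enumerate(lines):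
--         if line.startswith("## "):
--             count = 0
--             for l in lines[i + 1:]:
--                 if l.startswith("## "):
--                     break
--                 if l.strip().startswith("|"):
--                     count += 1
--             if count >= 4:
--                 return True, ""
--             return False, f"table lines in H2-1: {count}"
--     return False, "no H2 sections"
-- ===== Notes on version B (the rewrite author's own statement) =====
-- stated objective: simpler
-- what changed: B drops the find_h2_sections helper that builds the full list of (heading, joined-content) sections and instead scans the split lines once, counting table lines between the first H2 heading and the next heading, never joining or re-splitting strings.
import Mathlib
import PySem

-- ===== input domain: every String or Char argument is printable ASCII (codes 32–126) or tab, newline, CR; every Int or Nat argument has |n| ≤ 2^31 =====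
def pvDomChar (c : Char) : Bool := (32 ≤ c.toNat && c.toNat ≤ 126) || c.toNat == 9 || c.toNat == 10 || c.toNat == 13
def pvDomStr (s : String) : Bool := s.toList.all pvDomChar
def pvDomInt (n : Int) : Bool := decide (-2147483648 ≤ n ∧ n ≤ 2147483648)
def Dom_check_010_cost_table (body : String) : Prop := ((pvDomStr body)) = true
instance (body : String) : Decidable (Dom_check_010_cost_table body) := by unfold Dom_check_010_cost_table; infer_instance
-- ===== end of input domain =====

-- B replaces A's build-the-whole-section-list + join/re-split with one scan of the split
-- lines that counts table lines of the first H2 section directly (objective: simpler).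

-- ===== PORT A =====
-- Python's line.startswith("## ") / l.strip().startswith("|"); char-list literals for "## " and "|".
def pvIsH2 (l : List Char) : Bool := PySem.Chars.startswith l ['#', '#', ' ']

def pvIsTable (l : List Char) : Bool := PySem.Chars.startswith (PySem.Chars.strip l) ['|']

-- the body of A's `for line in lines:` loop, on state (sections, current_heading, current_lines)
def pvStepA (st : List (List Char × List Char) × Option (List Char) × List (List Char))
    (line : List Char) : List (List Char × List Char) × Option (List Char) × List (List Char) :=
  if pvIsH2 line then
    (match st.2.1 with
     | some h => st.1 ++ [(h, PySem.Chars.join ['\n'] st.2.2)]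
     | none => st.1, some line, [])
  else
    match st.2.1 with
    | some _ => (st.1, st.2.1, st.2.2 ++ [line])
    | none => st

-- A's trailing `if current_heading is not None: sections.append(...)`
def pvFinishA (st : List (List Char × List Char) × Option (List Char) × List (List Char)) :
    List (List Char × List Char) :=
  match st.2.1 with
  | some h => st.1 ++ [(h, PySem.Chars.join ['\n'] st.2.2)]
  | none => st.1

def pvFindH2Aux (lines : List (List Char)) : List (List Char × List Char) :=
  pvFinishA (lines.foldl pvStepA ([], none, []))

-- find_h2_sections; `body.split("\n")` is PySem.Chars.splitOn on toList ('\n' ≠ "", so Python never raises)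
def find_h2_sections (body : String) : List (List Char × List Char) :=
  pvFindH2Aux (PySem.Chars.splitOn body.toList ['\n'])

def check_010_cost_table (body : String) : Bool × String :=
  match find_h2_sections body with
  | [] => (false, "no H2 sections")
  | s :: _ =>
    let tableLines := (PySem.Chars.splitOn s.2 ['\n']).filter pvIsTable
    if 4 ≤ tableLines.length then (true, "")
    else (false, "table lines in H2-1: " ++ PySem.Int.toStr (tableLines.length : Int))

-- ===== PORT B =====
-- B's inner loop: count table lines until the next '## ' heading (or the end)
def pvCountTable : List (List Char) → Nat
  | [] => 0
  | l :: rest =>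
    if pvIsH2 l then 0
    else (if pvIsTable l then 1 else 0) + pvCountTable rest

-- B's outer loop: find the first '## ' heading, then judge its section
def pvScanB : List (List Char) → Bool × String
  | [] => (false, "no H2 sections")
  | l :: rest =>
    if pvIsH2 l then
      let c := pvCountTable rest
      if 4 ≤ c then (true, "")
      else (false, "table lines in H2-1: " ++ PySem.Int.toStr (c : Int))
    else pvScanB rest

def check_010_cost_table_alt (body : String) : Bool × String :=
  pvScanB (PySem.Chars.splitOn body.toList ['\n'])

-- ===== PRECONDITION & SPEC =====
def Spec_check_010_cost_table (body : String) (out : Bool × String) : Prop := out = check_010_cost_table_alt body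
instance (body : String) (out : Bool × String) : Decidable (Spec_check_010_cost_table body out) := by unfold Spec_check_010_cost_table; infer_instance

-- ===== CLAIM (what is proved, stated in full; the proofs are below) =====
def Claim_equal_check_010_cost_table : Prop := ∀ (body : String), Dom_check_010_cost_table body → Spec_check_010_cost_table body (check_010_cost_table body)

-- ===== LEMMAS AND PROOFS =====

-- PySem's fueled splitOn on a one-character separator is Mathlib's List.splitOn
theorem pv_go_eq (c : Char) (fuel : Nat) :
    ∀ (l cur : List Char) (acc : List (List Char)), l.length < fuel →
      PySem.Chars.splitOn.go [c] fuel l cur acc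
        = acc.reverse ++ (List.splitOn c l).modifyHead (cur.reverse ++ ·) := by
  induction fuel with
  | zero => intro l cur acc h; omega
  | succ fuel ih =>
    intro l cur acc h
    match l with
    | [] =>
      simp [PySem.Chars.splitOn.go, List.splitOn_nil]
    | a :: rest =>
      by_cases hc : a = c
      · subst hc
        have hpre : List.isPrefixOf [a] (a :: rest) = true := by
          simp [List.isPrefixOf]
        have hsp : (a :: rest).splitOn a = [] :: rest.splitOn a := by
          simp [List.splitOn, List.splitOnP_cons]
        rw [PySem.Chars.splitOn.go.eq_def]
        simp only [hpre, if_pos, show [a].length = 1 from rfl, List.drop_succ_cons,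
          List.drop_zero]
        rw [ih rest [] (cur.reverse :: acc) (by simpa using Nat.lt_of_succ_lt_succ h)]
        rw [hsp]
        simp only [List.modifyHead_cons, List.append_nil, List.reverse_nil,
          List.cons_append, List.reverse_cons, List.append_assoc, List.nil_append]
        cases List.splitOn a rest <;> simp
      · have hpre : List.isPrefixOf [c] (a :: rest) = false := by
          simp [List.isPrefixOf]
          exact fun hca => absurd hca.symm hc
        have hsp : (a :: rest).splitOn c = (rest.splitOn c).modifyHead (a :: ·) := by
          simp [List.splitOn, List.splitOnP_cons, hc]
        rw [PySem.Chars.splitOn.go.eq_def]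
        simp only [hpre, Bool.false_eq_true, if_false]
        rw [ih rest (a :: cur) acc (by simpa using Nat.lt_of_succ_lt_succ h)]
        rw [hsp]
        have hnn : rest.splitOn c ≠ [] := by
          simp only [List.splitOn]; exact List.splitOnP_ne_nil _ rest
        rcases he : rest.splitOn c with _ | ⟨h0, t0⟩
        · exact absurd he hnn
        · simp

theorem pv_splitOn_eq (s : List Char) (c : Char) :
    PySem.Chars.splitOn s [c] = List.splitOn c s := by
  unfold PySem.Chars.splitOn
  rw [pv_go_eq c (s.length + 1) s [] [] (by omega)]
  have hnn : s.splitOn c ≠ [] := by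
    simp only [List.splitOn]; exact List.splitOnP_ne_nil _ s
  rcases he : s.splitOn c with _ | ⟨h0, t0⟩
  · exact absurd he hnn
  · simp

-- pieces produced by List.splitOn do not contain the separator
theorem pv_splitOn_no_sep (c : Char) : ∀ (s : List Char), ∀ l ∈ List.splitOn c s, c ∉ l := by
  intro s
  induction s with
  | nil => simp [List.splitOn_nil]
  | cons a rest ih =>
    by_cases hc : a = c
    · subst hc
      have hsp : (a :: rest).splitOn a = [] :: rest.splitOn a := by
        simp [List.splitOn, List.splitOnP_cons]
      rw [hsp]
      intro l hl
      rcases List.mem_cons.1 hl with h | h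
      · subst h; simp
      · exact ih l h
    · have hsp : (a :: rest).splitOn c = (rest.splitOn c).modifyHead (a :: ·) := by
        simp [List.splitOn, List.splitOnP_cons, hc]
      have hnn : rest.splitOn c ≠ [] := by
        simp only [List.splitOn]; exact List.splitOnP_ne_nil _ rest
      rcases he : rest.splitOn c with _ | ⟨h0, t0⟩
      · exact absurd he hnn
      · rw [hsp, he]
        intro l hl
        rcases List.mem_cons.1 hl with h | h
        · subst h
          intro hmem
          rcases List.mem_cons.1 hmem with h' | h'
          · exact hc h'.symm
          · exact ih h0 (he ▸ List.mem_cons_self) h'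
        · exact ih l (he ▸ List.mem_cons_of_mem _ h)

-- B's counter counts exactly A's filtered table lines of the first section
theorem pv_count_eq (rest : List (List Char)) :
    pvCountTable rest = ((rest.takeWhile (fun l => !pvIsH2 l)).filter pvIsTable).length := by
  induction rest with
  | nil => simp [pvCountTable]
  | cons l t ih =>
    have e : pvCountTable (l :: t)
        = if pvIsH2 l then 0 else ((if pvIsTable l then 1 else 0) + pvCountTable t) := rfl
    rw [e, List.takeWhile_cons]
    by_cases h : pvIsH2 l
    · simp [h]
    · rw [if_neg h, if_pos (by simp [h] : (!pvIsH2 l) = true), List.filter_cons]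
      by_cases hq : pvIsTable l
      · simp [hq, ih]; omega
      · simp [hq, ih]

-- A's fold from a live heading: the first recorded section is (h, join (cur ++ takeWhile non-heading))
theorem pv_fold_from_heading :
    ∀ (rest : List (List Char)) (sections : List (List Char × List Char)) (h : List Char)
      (cur : List (List Char)),
      ∃ tail, pvFinishA (rest.foldl pvStepA (sections, some h, cur))
        = sections ++ (h, PySem.Chars.join ['\n'] (cur ++ rest.takeWhile (fun l => !pvIsH2 l))) :: tail := by
  intro rest
  induction rest with
  | nil => intro sections h cur; exact ⟨[], by simp [pvFinishA]⟩
  | cons l t ih =>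
    intro sections h cur
    by_cases hl : pvIsH2 l
    · obtain ⟨tail, ht⟩ := ih (sections ++ [(h, PySem.Chars.join ['\n'] cur)]) l []
      refine ⟨(l, PySem.Chars.join ['\n'] (t.takeWhile (fun x => !pvIsH2 x))) :: tail, ?_⟩
      rw [List.foldl_cons,
        show pvStepA (sections, some h, cur) l
            = (sections ++ [(h, PySem.Chars.join ['\n'] cur)], some l, []) from by
          simp [pvStepA, hl]]
      simp only [List.nil_append] at ht
      rw [ht]
      simp [hl]
    · obtain ⟨tail, ht⟩ := ih sections h (cur ++ [l])
      refine ⟨tail, ?_⟩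
      rw [List.foldl_cons,
        show pvStepA (sections, some h, cur) l = (sections, some h, cur ++ [l]) from by
          simp [pvStepA, hl]]
      rw [ht]
      simp [hl]

-- the main alignment on the split lines (each line newline-free)
theorem pv_main (lines : List (List Char)) (hnl : ∀ l ∈ lines, '\n' ∉ l) :
    (match pvFindH2Aux lines with
     | [] => (false, "no H2 sections")
     | s :: _ =>
       let tableLines := (PySem.Chars.splitOn s.2 ['\n']).filter pvIsTable
       if 4 ≤ tableLines.length then (true, "")
       else (false, "table lines in H2-1: " ++ PySem.Int.toStr (tableLines.length : Int)))
      = pvScanB lines := by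
  induction lines with
  | nil => simp [pvFindH2Aux, pvFinishA, pvScanB]
  | cons l rest ih =>
    by_cases hl : pvIsH2 l
    · -- first heading found
      obtain ⟨tail, ht⟩ := pv_fold_from_heading rest [] l []
      have hfind : pvFindH2Aux (l :: rest)
          = (l, PySem.Chars.join ['\n'] (rest.takeWhile (fun x => !pvIsH2 x))) :: tail := by
        unfold pvFindH2Aux
        rw [List.foldl_cons,
          show pvStepA ([], none, []) l = ([], some l, []) from by simp [pvStepA, hl]]
        simpa using ht
      have hcount : ((PySem.Chars.splitOn
            (PySem.Chars.join ['\n'] (rest.takeWhile (fun x => !pvIsH2 x))) ['\n']).filter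
              pvIsTable).length = pvCountTable rest := by
        by_cases hne : rest.takeWhile (fun x => !pvIsH2 x) = []
        · rw [hne, pv_count_eq, hne]
          decide
        · have hmem : ∀ w' ∈ rest.takeWhile (fun x => !pvIsH2 x), '\n' ∉ w' := by
            intro w' hw'
            exact hnl w' (List.mem_cons_of_mem _ ((List.takeWhile_sublist _).subset hw'))
          rw [pv_splitOn_eq,
            show PySem.Chars.join ['\n'] (rest.takeWhile (fun x => !pvIsH2 x))
                = ['\n'].intercalate (rest.takeWhile (fun x => !pvIsH2 x)) from rfl,
            List.splitOn_intercalate _ '\n' hmem hne, pv_count_eq]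
      rw [hfind]
      simp only [pvScanB, hl, if_pos]
      rw [hcount]
    · -- non-heading before the first heading: A's state is unchanged, B skips the line
      have hskip : pvFindH2Aux (l :: rest) = pvFindH2Aux rest := by
        unfold pvFindH2Aux
        rw [List.foldl_cons, show pvStepA ([], none, []) l = ([], none, []) from by
          simp [pvStepA, hl]]
      rw [hskip]
      simp only [pvScanB, hl, Bool.false_eq_true, if_false]
      exact ih (fun x hx => hnl x (List.mem_cons_of_mem _ hx))

-- ===== VERDICT (by name: the statement is the Claim_ definition above) =====
theorem check_010_cost_table_spec : Claim_equal_check_010_cost_table := by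
  intro body _
  unfold Spec_check_010_cost_table check_010_cost_table check_010_cost_table_alt find_h2_sections
  rw [pv_splitOn_eq]
  exact pv_main (List.splitOn '\n' body.toList) (pv_splitOn_no_sep '\n' body.toList)
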